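-- pv_equiv track=rewrite | github.com/marlonp97/ST0245-033 | laboratorios/lab01/ejercicioEnLinea/Laboratorio01 - Punto2.py | split53Aux
-- ===== SOURCE A (Python) =====
-- def split53Aux(start, nums, n5, n3):
--   if (start >= len(nums)):
--     return n5 == n3
--   elif (nums[start]%5 == 0):
--     return split53Aux(start+1, nums, n5+nums[start], n3)
--   elif (nums[start]%3 == 0):
--     return split53Aux(start+1, nums, n5, n3+nums[start])
--   elif (split53Aux(start+1, nums, n5+nums[start], n3)):
--     return True
--   elif (split53Aux(start+1, nums, n5, n3+nums[start])):
--     return True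
--   else:
--     return False
-- ===== SOURCE B (Python) =====
-- def split53Aux(start, nums, n5, n3):
--     base = n5 - n3
--     free = []
--     for x in nums[start:]:
--         if x % 5 == 0:
--             base += x
--         elif x % 3 == 0:
--             base -= x
--         else:
--             free.append(x)
--     reach = {0}
--     for x in free:
--         reach = {d + x for d in reach} | {d - x for d in reach}
--     return -base in reach
-- ===== Notes on version B (the rewrite author's own statement) =====
-- stated objective: alternative
-- what changed: A's two-way branching recursion is replaced by one linear pass that accumulates the forced mult-5/mult-3 difference and then a subset-sum reachability set over the free elements, deduplicating equal partial sums instead of exploring both branches per element.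
-- outside the precondition, e.g. on split53Aux(-1, [1], 0, 0): A returns True, B returns False
import Mathlib
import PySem

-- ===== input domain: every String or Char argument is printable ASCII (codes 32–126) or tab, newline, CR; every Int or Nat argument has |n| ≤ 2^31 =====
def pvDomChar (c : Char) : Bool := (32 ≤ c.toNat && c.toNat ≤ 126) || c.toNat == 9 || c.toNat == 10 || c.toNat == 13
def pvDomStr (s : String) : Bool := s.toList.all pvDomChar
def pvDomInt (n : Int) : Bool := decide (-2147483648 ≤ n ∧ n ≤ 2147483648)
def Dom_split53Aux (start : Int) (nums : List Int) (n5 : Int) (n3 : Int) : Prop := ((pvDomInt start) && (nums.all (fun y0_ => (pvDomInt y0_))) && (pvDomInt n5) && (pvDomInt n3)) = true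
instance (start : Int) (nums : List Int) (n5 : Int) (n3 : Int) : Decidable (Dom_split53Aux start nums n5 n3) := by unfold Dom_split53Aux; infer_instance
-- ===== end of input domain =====

-- B replaces A's exponential two-way recursion by one pass that splits off the forced (mult-5 / mult-3)
-- contributions and then a subset-sum reachability set over the free elements (objective: alternative).

-- ===== PORT A =====
-- fuel = number of remaining recursion steps (len - start); it only makes the recursion structural
def split53AuxGo (fuel : Nat) (start : Int) (nums : List Int) (n5 : Int) (n3 : Int) : Bool :=
  match fuel with
  | 0 => n5 == n3
  | fuel + 1 =>
    if (nums.length : Int) ≤ start then n5 == n3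
    else
      match PySem.List.pyGet? nums start with
      | none => false   -- IndexError (start < -len); excluded by Pre_
      | some x =>
        if PySem.Int.mod x 5 == 0 then split53AuxGo fuel (start + 1) nums (n5 + x) n3
        else if PySem.Int.mod x 3 == 0 then split53AuxGo fuel (start + 1) nums n5 (n3 + x)
        else if split53AuxGo fuel (start + 1) nums (n5 + x) n3 then true
        else if split53AuxGo fuel (start + 1) nums n5 (n3 + x) then true
        else false

def split53Aux (start : Int) (nums : List Int) (n5 : Int) (n3 : Int) : Bool :=
  split53AuxGo ((nums.length : Int) - start).toNat start nums n5 n3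

-- ===== PORT B =====
def split53Aux_alt (start : Int) (nums : List Int) (n5 : Int) (n3 : Int) : Bool :=
  let bf := (PySem.List.slice nums (some start) none).foldl
      (fun (p : Int × List Int) x =>
        if PySem.Int.mod x 5 == 0 then (p.1 + x, p.2)
        else if PySem.Int.mod x 3 == 0 then (p.1 - x, p.2)
        else (p.1, p.2 ++ [x]))
      (n5 - n3, [])
  let reach : PySem.Set Int := bf.2.foldl
      (fun (r : PySem.Set Int) x =>
        PySem.Set.union (PySem.Set.ofList (r.map (· + x))) (r.map (· - x)))
      (PySem.Set.ofList [(0 : Int)])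
  PySem.Set.contains reach (-bf.1)

-- ===== PRECONDITION & SPEC =====
-- Pre_ excludes negative start (A returns on -len ≤ start < 0, but only via CPython's negative-index
-- wraparound, which makes the recursion visit trailing elements and then the whole list — an accident of
-- the recursion pointer, whose intended callers use start = 0; below -len A raises IndexError).
def Pre_split53Aux (start : Int) (nums : List Int) (n5 : Int) (n3 : Int) : Prop := 0 ≤ start
instance (start : Int) (nums : List Int) (n5 : Int) (n3 : Int) : Decidable (Pre_split53Aux start nums n5 n3) := by unfold Pre_split53Aux; infer_instance

def pvWitness_split53Aux : Int × List Int × Int × Int := (0, [1, 5, 3, 2], 0, 0)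

def Spec_split53Aux (start : Int) (nums : List Int) (n5 : Int) (n3 : Int) (out : Bool) : Prop := out = split53Aux_alt start nums n5 n3
instance (start : Int) (nums : List Int) (n5 : Int) (n3 : Int) (out : Bool) : Decidable (Spec_split53Aux start nums n5 n3 out) := by unfold Spec_split53Aux; infer_instance

-- ===== CLAIM (what is proved, stated in full; the proofs are below) =====
def Claim_equal_split53Aux : Prop := ∀ (start : Int) (nums : List Int) (n5 : Int) (n3 : Int), Dom_split53Aux start nums n5 n3 → Pre_split53Aux start nums n5 n3 → Spec_split53Aux start nums n5 n3 (split53Aux start nums n5 n3)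

-- ===== LEMMAS AND PROOFS =====

-- A's recursion restated structurally on the suffix list
def listA : List Int → Int → Int → Bool
  | [], n5, n3 => n5 == n3
  | x :: xs, n5, n3 =>
    if PySem.Int.mod x 5 == 0 then listA xs (n5 + x) n3
    else if PySem.Int.mod x 3 == 0 then listA xs n5 (n3 + x)
    else listA xs (n5 + x) n3 || listA xs n5 (n3 + x)

-- forced contribution of the multiples of 5 / 3, and the free elements
def shiftL : List Int → Int
  | [] => 0
  | x :: xs => (if PySem.Int.mod x 5 == 0 then x else if PySem.Int.mod x 3 == 0 then -x else 0) + shiftL xs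

def freeL : List Int → List Int
  | [] => []
  | x :: xs => if PySem.Int.mod x 5 == 0 then freeL xs
               else if PySem.Int.mod x 3 == 0 then freeL xs
               else x :: freeL xs

-- all signed sums of a list
def allSums : List Int → List Int
  | [] => [0]
  | x :: xs => (allSums xs).map (· + x) ++ (allSums xs).map (· - x)

theorem split53AuxGo_eq_listA (fuel : Nat) (start : Int) (nums : List Int) (n5 n3 : Int)
    (h0 : 0 ≤ start) (hf : (nums.length : Int) - start ≤ fuel) :
    split53AuxGo fuel start nums n5 n3 = listA (nums.drop start.toNat) n5 n3 := by
  induction fuel generalizing start n5 n3 with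
  | zero =>
    have : nums.length ≤ start.toNat := by omega
    simp [split53AuxGo, List.drop_eq_nil_of_le this, listA]
  | succ f ih =>
    by_cases hlen : (nums.length : Int) ≤ start
    · have : nums.length ≤ start.toNat := by omega
      simp [split53AuxGo, hlen, List.drop_eq_nil_of_le this, listA]
    · have hlt : start.toNat < nums.length := by omega
      have hget : PySem.List.pyGet? nums start = some nums[start.toNat] :=
        PySem.List.pyGet?_eq_some_getElem (xs := nums) (i := start) h0 (by omega)
      have hdrop : nums.drop start.toNat = nums[start.toNat] :: nums.drop (start.toNat + 1) :=
        List.drop_eq_getElem_cons hlt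
      have htn : (start + 1).toNat = start.toNat + 1 := by omega
      have ih5 := ih (start + 1) (n5 + nums[start.toNat]) n3 (by omega) (by omega)
      have ih3 := ih (start + 1) n5 (n3 + nums[start.toNat]) (by omega) (by omega)
      rw [htn] at ih5 ih3
      simp only [split53AuxGo, if_neg hlen, hget, hdrop, listA, ih5, ih3]
      by_cases h5 : (PySem.Int.mod nums[start.toNat] 5 == 0) = true
      · simp only [if_pos h5]
      · by_cases h3 : (PySem.Int.mod nums[start.toNat] 3 == 0) = true
        · simp only [if_neg h5, if_pos h3]
        · simp only [if_neg h5, if_neg h3]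
          cases hA : listA (nums.drop (start.toNat + 1)) (n5 + nums[start.toNat]) n3 <;>
            cases hB : listA (nums.drop (start.toNat + 1)) n5 (n3 + nums[start.toNat]) <;>
            simp

theorem listA_iff (xs : List Int) (n5 n3 : Int) :
    listA xs n5 n3 = true ↔ ∃ s ∈ allSums (freeL xs), n5 - n3 + shiftL xs + s = 0 := by
  induction xs generalizing n5 n3 with
  | nil =>
    simp only [listA, allSums, freeL, shiftL, beq_iff_eq, List.mem_singleton]
    constructor
    · intro h; exact ⟨0, rfl, by omega⟩
    · rintro ⟨s, rfl, h⟩; omega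
  | cons x xs ih =>
    simp only [listA, freeL, shiftL]
    split_ifs with h5 h3
    · rw [ih]
      constructor
      · rintro ⟨s, hs, h⟩; exact ⟨s, hs, by omega⟩
      · rintro ⟨s, hs, h⟩; exact ⟨s, hs, by omega⟩
    · rw [ih]
      constructor
      · rintro ⟨s, hs, h⟩; exact ⟨s, hs, by omega⟩
      · rintro ⟨s, hs, h⟩; exact ⟨s, hs, by omega⟩
    · simp only [Bool.or_eq_true, ih, allSums, List.mem_append, List.mem_map]
      constructor
      · rintro (⟨s, hs, h⟩ | ⟨s, hs, h⟩)
        · exact ⟨s + x, Or.inl ⟨s, hs, rfl⟩, by omega⟩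
        · exact ⟨s - x, Or.inr ⟨s, hs, rfl⟩, by omega⟩
      · rintro ⟨t, (⟨s, hs, rfl⟩ | ⟨s, hs, rfl⟩), h⟩
        · exact Or.inl ⟨s, hs, by omega⟩
        · exact Or.inr ⟨s, hs, by omega⟩

-- B's first fold computes (base + shiftL xs, acc ++ freeL xs)
theorem foldBF (xs : List Int) (b : Int) (fr : List Int) :
    xs.foldl (fun (p : Int × List Int) x =>
        if PySem.Int.mod x 5 == 0 then (p.1 + x, p.2)
        else if PySem.Int.mod x 3 == 0 then (p.1 - x, p.2)
        else (p.1, p.2 ++ [x])) (b, fr)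
      = (b + shiftL xs, fr ++ freeL xs) := by
  induction xs generalizing b fr with
  | nil => simp [shiftL, freeL]
  | cons x xs ih =>
    simp only [List.foldl_cons, shiftL, freeL]
    by_cases h5 : (PySem.Int.mod x 5 == 0) = true
    · simp only [if_pos h5]
      rw [ih, add_assoc]
    · by_cases h3 : (PySem.Int.mod x 3 == 0) = true
      · simp only [if_neg h5, if_pos h3]
        rw [ih]
        simp only [Prod.mk.injEq]
        exact ⟨by ring, trivial⟩
      · simp only [if_neg h5, if_neg h3]
        rw [ih]
        simp [List.append_assoc]

-- B's second fold: membership in the reachability set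
theorem mem_reachFold (free : List Int) (R : PySem.Set Int) (d : Int) :
    d ∈ free.foldl (fun (r : PySem.Set Int) x =>
        PySem.Set.union (PySem.Set.ofList (r.map (· + x))) (r.map (· - x))) R
      ↔ ∃ r ∈ R, d - r ∈ allSums free := by
  induction free generalizing R with
  | nil =>
    simp only [List.foldl_nil, allSums, List.mem_singleton]
    constructor
    · intro h; exact ⟨d, h, by omega⟩
    · rintro ⟨r, hr, h⟩; have : d = r := by omega
      simpa [this] using hr
  | cons x xs ih =>
    simp only [List.foldl_cons, ih, PySem.Set.mem_union, PySem.Set.mem_ofList, List.mem_map,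
      allSums, List.mem_append]
    constructor
    · rintro ⟨r', (⟨r, hr, rfl⟩ | ⟨r, hr, rfl⟩), hs⟩
      · exact ⟨r, hr, Or.inl ⟨d - (r + x), hs, by ring⟩⟩
      · exact ⟨r, hr, Or.inr ⟨d - (r - x), hs, by ring⟩⟩
    · rintro ⟨r, hr, (⟨s, hs, he⟩ | ⟨s, hs, he⟩)⟩
      · refine ⟨r + x, Or.inl ⟨r, hr, rfl⟩, ?_⟩
        have hse : d - (r + x) = s := by omega
        rwa [hse]
      · refine ⟨r - x, Or.inr ⟨r, hr, rfl⟩, ?_⟩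
        have hse : d - (r - x) = s := by omega
        rwa [hse]

theorem alt_iff (start : Int) (nums : List Int) (n5 n3 : Int) (h0 : 0 ≤ start) :
    split53Aux_alt start nums n5 n3 = true
      ↔ ∃ s ∈ allSums (freeL (nums.drop start.toNat)),
          n5 - n3 + shiftL (nums.drop start.toNat) + s = 0 := by
  unfold split53Aux_alt
  rw [PySem.List.slice_from _ h0, foldBF]
  simp only [PySem.Set.contains_iff, mem_reachFold, PySem.Set.mem_ofList, List.mem_singleton,
    List.nil_append]
  constructor
  · rintro ⟨r, rfl, hs⟩
    exact ⟨-(n5 - n3 + shiftL (nums.drop start.toNat)) - 0, hs, by ring⟩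
  · rintro ⟨s, hs, he⟩
    refine ⟨0, rfl, ?_⟩
    have hse : -(n5 - n3 + shiftL (nums.drop start.toNat)) - 0 = s := by omega
    rwa [hse]

-- ===== VERDICT (by name: the statement is the Claim_ definition above) =====
theorem split53Aux_spec : Claim_equal_split53Aux := by
  intro start nums n5 n3 _ hpre
  unfold Spec_split53Aux
  have h0 : 0 ≤ start := hpre
  rw [Bool.eq_iff_iff]
  rw [show (split53Aux start nums n5 n3 = true) ↔ _ from
    (by rw [split53Aux, split53AuxGo_eq_listA _ _ _ _ _ h0 (by omega), listA_iff])]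
  exact (alt_iff start nums n5 n3 h0).symm
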